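-- pv_equiv track=rewrite | github.com/gesture02/Algorithm | 백준/20327.py | r7
-- ===== SOURCE A (Python) =====
-- def r7(p, l):
--     n = len(p)
--     a = [[0] * n for _ in range(n)]
--     subSize = (1 << l)
--     subCount = n // subSize
--     for i in range(subCount):
--         for j in range(subCount):
--             sx1 = i * subSize
--             sy1 = j * subSize
--             sx2 = (subCount-1-j) * subSize
--             sy2 = i * subSize
--             for x in range(subSize):
--                 for y in range(subSize):
--                     a[sx1+x][sy1+y] = p[sx2+x][sy2+y]
--     return a
-- ===== SOURCE B (Python) =====
-- def r7(p, l):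
--     n = len(p)
--     s = 1 << l
--     c = n // s
--     m = c * s
--
--     def block(bi, bj):
--         return [row[bj * s:(bj + 1) * s] for row in p[bi * s:(bi + 1) * s]]
--
--     rot = [[block(c - 1 - j, i) for j in range(c)] for i in range(c)]
--     out = []
--     for brow in rot:
--         for x in range(s):
--             out.append([v for b in brow for v in b[x]] + [0] * (n - m))
--     out.extend([0] * n for _ in range(n - m))
--     return out
-- ===== Notes on version B (the rewrite author's own statement) =====
-- stated objective: alternative
-- what changed: B materializes an explicit grid of subSize-square blocks sliced out of p, rotates the block grid (new[i][j] = blocks[c-1-j][i]), and assembles each output row by concatenating block rows plus a zero border, instead of A's four nested index loops writing cells into a preallocated zero matrix.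
import Mathlib
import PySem

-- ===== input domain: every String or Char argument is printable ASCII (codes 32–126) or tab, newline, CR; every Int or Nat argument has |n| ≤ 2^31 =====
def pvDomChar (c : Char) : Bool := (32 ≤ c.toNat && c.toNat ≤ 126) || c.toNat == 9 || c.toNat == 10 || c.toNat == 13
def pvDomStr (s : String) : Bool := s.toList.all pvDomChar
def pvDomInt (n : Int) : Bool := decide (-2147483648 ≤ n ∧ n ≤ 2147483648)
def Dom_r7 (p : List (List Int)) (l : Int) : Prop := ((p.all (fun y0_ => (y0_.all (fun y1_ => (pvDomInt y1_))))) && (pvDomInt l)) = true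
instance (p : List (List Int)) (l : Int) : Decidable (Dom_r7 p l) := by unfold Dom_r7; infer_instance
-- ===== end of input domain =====

-- B replaces A's four nested index loops writing into a preallocated matrix by an explicit
-- grid of sliced-out blocks, rotated as a grid and concatenated into the output rows
-- (alternative decomposition, same O(n^2) cost); neither version mutates p.

-- ===== PORT A =====
-- Literal transliteration of A.  `1 << l` is ported as `1 <<< l.toNat` (exact for 0 ≤ l,
-- which Pre_r7 requires: Python raises ValueError on l < 0); the read p[sx2+x][sy2+y] is
-- ported with getD defaults — Pre_r7 admits exactly the inputs where those reads are in
-- range, i.e. where the Python returns instead of raising IndexError.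
def r7 (p : List (List Int)) (l : Int) : List (List Int) :=
  let n := p.length
  let a := List.replicate n (List.replicate n (0 : Int))
  let subSize := 1 <<< l.toNat
  let subCount := n / subSize
  (List.range subCount).foldl (fun a i =>
    (List.range subCount).foldl (fun a j =>
      let sx1 := i * subSize
      let sy1 := j * subSize
      let sx2 := (subCount - 1 - j) * subSize
      let sy2 := i * subSize
      (List.range subSize).foldl (fun a x =>
        (List.range subSize).foldl (fun a y =>
          a.modify (sx1 + x) (fun row => row.set (sy1 + y)
            ((p.getD (sx2 + x) []).getD (sy2 + y) 0)))
          a) a) a) a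

-- ===== PORT B =====
-- Literal transliteration of Source B: the Python slices row[a:b] / p[a:b] (0 ≤ a ≤ b) are
-- ported as (·.drop a).take (b-a), exact for these nonnegative in-range bounds; b[x] is
-- ported with getD (in range under Pre_r7, like A's reads).
def r7_alt (p : List (List Int)) (l : Int) : List (List Int) :=
  let n := p.length
  let s := 1 <<< l.toNat
  let c := n / s
  let m := c * s
  let block := fun (bi bj : Nat) =>
    ((p.drop (bi * s)).take s).map (fun row => (row.drop (bj * s)).take s)
  let rot := (List.range c).map (fun i => (List.range c).map (fun j => block (c - 1 - j) i))
  (rot.flatMap (fun brow => (List.range s).map (fun x =>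
      brow.flatMap (fun b => b.getD x []) ++ List.replicate (n - m) (0 : Int))))
    ++ List.replicate (n - m) (List.replicate n (0 : Int))

-- ===== PRECONDITION & SPEC =====
-- Exactly the inputs on which the Python A returns: l ≥ 0 (else `1 << l` raises
-- ValueError) and every row A reads (the first subCount*subSize rows) is long enough
-- for every column A reads (else IndexError).
def Pre_r7 (p : List (List Int)) (l : Int) : Prop :=
  0 ≤ l ∧ ∀ row ∈ p.take (p.length / (1 <<< l.toNat) * (1 <<< l.toNat)),
    p.length / (1 <<< l.toNat) * (1 <<< l.toNat) ≤ row.length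
instance (p : List (List Int)) (l : Int) : Decidable (Pre_r7 p l) := by
  unfold Pre_r7; infer_instance
def pvWitness_r7 : List (List Int) × Int := ([[1, 2], [3, 4]], 0)

def Spec_r7 (p : List (List Int)) (l : Int) (out : List (List Int)) : Prop := out = r7_alt p l
instance (p : List (List Int)) (l : Int) (out : List (List Int)) : Decidable (Spec_r7 p l out) := by unfold Spec_r7; infer_instance

-- ===== CLAIM (what is proved, stated in full; the proofs are below) =====
def Claim_equal_r7 : Prop := ∀ (p : List (List Int)) (l : Int), Dom_r7 p l → Pre_r7 p l → Spec_r7 p l (r7 p l)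

-- ===== LEMMAS AND PROOFS =====

-- entry (u,v) of a matrix, with Python-A's read defaults
def pvE (A : List (List Int)) (u v : Nat) : Int := (A.getD u []).getD v 0

-- the value A writes at destination (u,v) inside the rotated region
def pvVal (p : List (List Int)) (s c u v : Nat) : Int :=
  (p.getD ((c - 1 - v / s) * s + u % s) []).getD (u / s * s + v % s) 0

def pvShape (A : List (List Int)) (n : Nat) : Prop :=
  A.length = n ∧ ∀ row ∈ A, row.length = n

-- the (i,j) block write of A, as a named function
def pvWy (p : List (List Int)) (s c i j : Nat) (a : List (List Int)) : List (List Int) :=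
  (List.range s).foldl (fun a x =>
    (List.range s).foldl (fun a y =>
      a.modify (i * s + x) (fun row => row.set (j * s + y)
        ((p.getD ((c - 1 - j) * s + x) []).getD (i * s + y) 0)))
      a) a

-- the row of blocks picture of B, with the map-flatMap fusions done
def pvRow (p : List (List Int)) (s c i x : Nat) : List Int :=
  ((List.range c).flatMap (fun j =>
    ((((p.drop ((c - 1 - j) * s)).take s).map (fun row => (row.drop (i * s)).take s)).getD x [])))
    ++ List.replicate (p.length - c * s) (0 : Int)

lemma blk_div_mod (s q r : Nat) (hr : r < s) : (q * s + r) / s = q ∧ (q * s + r) % s = r := by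
  have hs : 0 < s := by omega
  constructor
  · rw [Nat.add_comm, Nat.mul_comm, Nat.add_mul_div_left _ _ hs, Nat.div_eq_of_lt hr]
    omega
  · rw [Nat.add_comm, Nat.mul_comm, Nat.add_mul_mod_self_left, Nat.mod_eq_of_lt hr]


lemma modify_id' (A : List (List Int)) (u : Nat) : A.modify u (fun r => r) = A := by
  apply List.ext_getElem?
  intro j
  simp [List.getElem?_modify]

lemma modify_modify (A : List (List Int)) (u : Nat) (f g : List Int → List Int) :
    (A.modify u f).modify u g = A.modify u (fun r => g (f r)) := by
  apply List.ext_getElem?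
  intro j
  simp only [List.getElem?_modify]
  cases A[j]? with
  | none => rfl
  | some r => by_cases h : u = j <;> simp [h]

lemma fold_modify_same (k u : Nat) (h : Nat → List Int → List Int) (A : List (List Int)) :
    (List.range k).foldl (fun A y => A.modify u (h y)) A
      = A.modify u (fun r => (List.range k).foldl (fun r y => h y r) r) := by
  induction k with
  | zero => simp [modify_id' A u]
  | succ k ih =>
    rw [List.range_succ]
    simp only [List.foldl_append, List.foldl_cons, List.foldl_nil]
    rw [ih, modify_modify]

lemma setfold_len (k b : Nat) (f : Nat → Int) (r : List Int) :
    ((List.range k).foldl (fun r y => r.set (b + y) (f y)) r).length = r.length := by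
  induction k with
  | zero => rfl
  | succ k ih => rw [List.range_succ]; simp only [List.foldl_append, List.foldl_cons,
                   List.foldl_nil, List.length_set]; exact ih

lemma setfold_get (k b : Nat) (f : Nat → Int) (r : List Int) (v : Nat) :
    ((List.range k).foldl (fun r y => r.set (b + y) (f y)) r)[v]?
      = if b ≤ v ∧ v < b + k ∧ v < r.length then some (f (v - b)) else r[v]? := by
  induction k with
  | zero => simp only [List.range_zero, List.foldl_nil]; rw [if_neg (by omega)]
  | succ k ih =>
    rw [List.range_succ]
    simp only [List.foldl_append, List.foldl_cons, List.foldl_nil]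
    rw [List.getElem?_set, setfold_len, ih]
    by_cases h1 : b + k = v
    · subst h1
      by_cases hv : b + k < r.length
      · rw [if_pos rfl, if_pos hv, if_pos ⟨by omega, by omega, hv⟩, Nat.add_sub_cancel_left]
      · rw [if_pos rfl, if_neg hv, if_neg (by omega)]
        exact (List.getElem?_eq_none (by omega)).symm
    · rw [if_neg h1]
      by_cases h2 : b ≤ v ∧ v < b + k ∧ v < r.length
      · rw [if_pos h2, if_pos ⟨h2.1, by omega, h2.2.2⟩]
      · rw [if_neg h2, if_neg (by omega)]

lemma modfold_len (k b : Nat) (g : Nat → List Int → List Int) (A : List (List Int)) :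
    ((List.range k).foldl (fun A x => A.modify (b + x) (g x)) A).length = A.length := by
  induction k with
  | zero => rfl
  | succ k ih => rw [List.range_succ]; simp only [List.foldl_append, List.foldl_cons,
                   List.foldl_nil, List.length_modify]; exact ih

lemma modfold_get (k b : Nat) (g : Nat → List Int → List Int) (A : List (List Int)) (u : Nat) :
    ((List.range k).foldl (fun A x => A.modify (b + x) (g x)) A)[u]?
      = if b ≤ u ∧ u < b + k then (g (u - b)) <$> A[u]? else A[u]? := by
  induction k with
  | zero => simp only [List.range_zero, List.foldl_nil]; rw [if_neg (by omega)]
  | succ k ih =>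
    rw [List.range_succ]
    simp only [List.foldl_append, List.foldl_cons, List.foldl_nil]
    rw [List.getElem?_modify, ih]
    by_cases h1 : b + k = u
    · subst h1
      rw [if_neg (by omega), if_pos (by omega), Nat.add_sub_cancel_left]
      cases A[b+k]? <;> simp
    · by_cases h2 : b ≤ u ∧ u < b + k
      · rw [if_pos h2, if_pos (by omega)]
        cases A[u]? <;> simp [h1]
      · rw [if_neg h2, if_neg (by omega)]
        cases A[u]? <;> simp [h1]

lemma r7_eq_fold (p : List (List Int)) (l : Int) :
    r7 p l = (List.range (p.length / (1 <<< l.toNat))).foldl (fun a i =>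
      (List.range (p.length / (1 <<< l.toNat))).foldl
        (fun a j => pvWy p (1 <<< l.toNat) (p.length / (1 <<< l.toNat)) i j a) a)
      (List.replicate p.length (List.replicate p.length (0 : Int))) := rfl

lemma flat_len {α : Type} (c s : Nat) (F : Nat → List α)
    (h : ∀ i, i < c → (F i).length = s) :
    ((List.range c).flatMap F).length = c * s := by
  induction c with
  | zero => simp
  | succ c ih =>
    rw [List.range_succ, List.flatMap_append, List.length_append,
      ih (fun i hi => h i (by omega))]
    simp [h c (by omega), Nat.succ_mul]

lemma flat_get {α : Type} (c s : Nat) (F : Nat → List α)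
    (h : ∀ i, i < c → (F i).length = s) (u : Nat) (hu : u < c * s) :
    ((List.range c).flatMap F)[u]? = (F (u / s))[u % s]? := by
  induction c with
  | zero => omega
  | succ c ih =>
    rw [List.range_succ, List.flatMap_append, List.getElem?_append,
      flat_len c s F (fun i hi => h i (by omega))]
    have hcs : (c + 1) * s = c * s + s := by ring
    rw [hcs] at hu
    by_cases h1 : u < c * s
    · rw [if_pos h1, ih (fun i hi => h i (by omega)) h1]
    · rw [if_neg h1]
      have hs : 0 < s := by by_contra hs; omega
      have hdiv : u / s = c ∧ u % s = u - c * s := by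
        obtain ⟨r, rfl⟩ : ∃ r, u = c * s + r := ⟨u - c * s, by omega⟩
        constructor
        · rw [Nat.add_comm, Nat.mul_comm, Nat.add_mul_div_left _ _ hs,
            Nat.div_eq_of_lt (by omega)]
          omega
        · rw [Nat.add_comm, Nat.mul_comm, Nat.add_mul_mod_self_left,
            Nat.mod_eq_of_lt (by omega)]
          omega
      rw [hdiv.1, hdiv.2]
      simp

lemma pvWy_eq_modfold (p : List (List Int)) (s c i j : Nat) (A : List (List Int)) :
    pvWy p s c i j A = (List.range s).foldl (fun A x => A.modify (i * s + x)
      (fun row => (List.range s).foldl (fun r y => r.set (j * s + y)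
        ((p.getD ((c - 1 - j) * s + x) []).getD (i * s + y) 0)) row)) A := by
  unfold pvWy
  congr 1
  funext A x
  exact fold_modify_same s (i * s + x) _ A

lemma pvWy_len (p : List (List Int)) (s c i j : Nat) (A : List (List Int)) :
    (pvWy p s c i j A).length = A.length := by
  rw [pvWy_eq_modfold]; exact modfold_len s (i * s) _ A

lemma pvWy_get (p : List (List Int)) (s c i j : Nat) (A : List (List Int)) (u : Nat) :
    (pvWy p s c i j A)[u]?
      = if i * s ≤ u ∧ u < i * s + s
        then ((fun row => (List.range s).foldl (fun r y => r.set (j * s + y)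
          ((p.getD ((c - 1 - j) * s + (u - i * s)) []).getD (i * s + y) 0)) row)) <$> A[u]?
        else A[u]? := by
  rw [pvWy_eq_modfold]; exact modfold_get s (i * s) _ A u

lemma pvWy_shape (p : List (List Int)) (s c i j n : Nat) (A : List (List Int))
    (hA : pvShape A n) : pvShape (pvWy p s c i j A) n := by
  refine ⟨by rw [pvWy_len]; exact hA.1, ?_⟩
  intro row hrow
  obtain ⟨u, hu⟩ := List.mem_iff_getElem?.mp hrow
  rw [pvWy_get] at hu
  split_ifs at hu with h
  · cases hA' : A[u]? with
    | none => rw [hA'] at hu; simp only [Option.map_eq_map, Option.map_none] at hu; exact absurd hu (by simp)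
    | some r =>
      rw [hA'] at hu
      simp only [Option.map_eq_map, Option.map_some, Option.some.injEq] at hu
      rw [← hu, setfold_len]
      exact hA.2 r (List.mem_of_getElem? hA')
  · exact hA.2 row (List.mem_of_getElem? hu)

lemma pvWy_E (p : List (List Int)) (s c i j n : Nat) (A : List (List Int))
    (hA : pvShape A n) (hmn : c * s ≤ n) (hi : i < c) (hj : j < c) (u v : Nat) :
    pvE (pvWy p s c i j A) u v
      = if i * s ≤ u ∧ u < i * s + s ∧ j * s ≤ v ∧ v < j * s + s
        then pvVal p s c u v else pvE A u v := by
  simp only [pvE, List.getD_eq_getElem?_getD]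
  rw [pvWy_get]
  by_cases hu : i * s ≤ u ∧ u < i * s + s
  · rw [if_pos hu]
    have hb : i * s + s ≤ c * s := by
      have h := Nat.mul_le_mul_right s (Nat.succ_le_of_lt hi)
      rwa [Nat.succ_mul] at h
    have hun : u < n := by omega
    cases hA' : A[u]? with
    | none => exfalso; rw [List.getElem?_eq_none_iff, hA.1] at hA'; omega
    | some r =>
      have hrlen : r.length = n := hA.2 r (List.mem_of_getElem? hA')
      simp only [Option.map_eq_map, Option.map_some, Option.getD_some]
      rw [setfold_get]
      by_cases hv : j * s ≤ v ∧ v < j * s + s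
      · have hvb : j * s + s ≤ c * s := by
          have h := Nat.mul_le_mul_right s (Nat.succ_le_of_lt hj)
          rwa [Nat.succ_mul] at h
        have hvn : v < n := by omega
        rw [if_pos ⟨hv.1, by omega, by omega⟩, if_pos ⟨hu.1, hu.2, hv.1, hv.2⟩]
        simp only [Option.getD_some]
        unfold pvVal
        obtain ⟨hd1, hm1⟩ := blk_div_mod s i (u - i * s) (by omega)
        obtain ⟨hd2, hm2⟩ := blk_div_mod s j (v - j * s) (by omega)
        have e1 : i * s + (u - i * s) = u := by omega
        have e2 : j * s + (v - j * s) = v := by omega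
        rw [e1] at hd1 hm1
        rw [e2] at hd2 hm2
        rw [hd1, hm1, hd2, hm2, List.getD_eq_getElem?_getD, List.getD_eq_getElem?_getD]
      · rw [if_neg (by omega), if_neg (by omega)]
  · rw [if_neg hu, if_neg (by omega)]

lemma jfold_E (p : List (List Int)) (s c i n : Nat) (A : List (List Int))
    (hA : pvShape A n) (hmn : c * s ≤ n) (hi : i < c) (t : Nat) (ht : t ≤ c) :
    pvShape ((List.range t).foldl (fun a j => pvWy p s c i j a) A) n ∧
    ∀ u v, pvE ((List.range t).foldl (fun a j => pvWy p s c i j a) A) u v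
      = if i * s ≤ u ∧ u < i * s + s ∧ v < t * s then pvVal p s c u v else pvE A u v := by
  induction t with
  | zero =>
    refine ⟨hA, fun u v => ?_⟩
    simp only [List.range_zero, List.foldl_nil]
    rw [if_neg (by omega)]
  | succ t ih =>
    obtain ⟨ihS, ihE⟩ := ih (by omega)
    rw [List.range_succ, List.foldl_append, List.foldl_cons, List.foldl_nil]
    refine ⟨pvWy_shape p s c i t n _ ihS, fun u v => ?_⟩
    rw [pvWy_E p s c i t n _ ihS hmn hi (by omega), ihE]
    have hts : (t + 1) * s = t * s + s := by ring
    by_cases h1 : i * s ≤ u ∧ u < i * s + s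
    · by_cases h2 : t * s ≤ v ∧ v < t * s + s
      · rw [if_pos ⟨h1.1, h1.2, h2.1, h2.2⟩, if_pos ⟨h1.1, h1.2, by omega⟩]
      · by_cases h3 : v < t * s
        · rw [if_neg (by omega), if_pos ⟨h1.1, h1.2, h3⟩, if_pos ⟨h1.1, h1.2, by omega⟩]
        · rw [if_neg (by omega), if_neg (by omega), if_neg (by omega)]
    · rw [if_neg (by omega), if_neg (by omega), if_neg (by omega)]

lemma ifold_E (p : List (List Int)) (s c n : Nat) (A : List (List Int))
    (hA : pvShape A n) (hmn : c * s ≤ n) (t : Nat) (ht : t ≤ c) :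
    pvShape ((List.range t).foldl (fun a i =>
      (List.range c).foldl (fun a j => pvWy p s c i j a) a) A) n ∧
    ∀ u v, pvE ((List.range t).foldl (fun a i =>
        (List.range c).foldl (fun a j => pvWy p s c i j a) a) A) u v
      = if u < t * s ∧ v < c * s then pvVal p s c u v else pvE A u v := by
  induction t with
  | zero =>
    refine ⟨hA, fun u v => ?_⟩
    simp only [List.range_zero, List.foldl_nil]
    rw [if_neg (by omega)]
  | succ t ih =>
    obtain ⟨ihS, ihE⟩ := ih (by omega)
    rw [List.range_succ, List.foldl_append, List.foldl_cons, List.foldl_nil]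
    obtain ⟨jS, jE⟩ := jfold_E p s c t n _ ihS hmn (by omega) c (le_refl c)
    refine ⟨jS, fun u v => ?_⟩
    rw [jE, ihE]
    have hts : (t + 1) * s = t * s + s := by ring
    by_cases h2 : v < c * s
    · by_cases h1 : t * s ≤ u ∧ u < t * s + s
      · rw [if_pos ⟨h1.1, h1.2, h2⟩, if_pos ⟨by omega, h2⟩]
      · by_cases h3 : u < t * s
        · rw [if_neg (by omega), if_pos ⟨h3, h2⟩, if_pos ⟨by omega, h2⟩]
        · rw [if_neg (by omega), if_neg (by omega), if_neg (by omega)]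
    · rw [if_neg (by omega), if_neg (by omega), if_neg (by omega)]

lemma zero_E (n u v : Nat) :
    pvE (List.replicate n (List.replicate n (0 : Int))) u v = 0 := by
  unfold pvE
  simp only [List.getD_eq_getElem?_getD, List.getElem?_replicate]
  split_ifs <;> simp

lemma r7_alt_eq (p : List (List Int)) (l : Int) :
    r7_alt p l = (List.range (p.length / (1 <<< l.toNat))).flatMap (fun i =>
        (List.range (1 <<< l.toNat)).map (fun x =>
          pvRow p (1 <<< l.toNat) (p.length / (1 <<< l.toNat)) i x))
      ++ List.replicate (p.length - p.length / (1 <<< l.toNat) * (1 <<< l.toNat))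
          (List.replicate p.length (0 : Int)) := by
  unfold r7_alt pvRow
  simp only [List.flatMap_map]

lemma seg_fact (p : List (List Int)) (s c i j x : Nat) (_hs : 0 < s)
    (hc : c * s ≤ p.length)
    (hrows : ∀ row ∈ p.take (c * s), c * s ≤ row.length)
    (hi : i < c) (hj : j < c) (hx : x < s) :
    ((((p.drop ((c - 1 - j) * s)).take s).map (fun row => (row.drop (i * s)).take s)).getD x [])
      = ((p.getD ((c - 1 - j) * s + x) []).drop (i * s)).take s ∧
    (((p.getD ((c - 1 - j) * s + x) []).drop (i * s)).take s).length = s := by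
  have hjs : (c - 1 - j) * s + s ≤ c * s := by
    have h1 := Nat.mul_le_mul_right s (show c - 1 - j + 1 ≤ c by omega)
    rwa [Nat.succ_mul] at h1
  have his : i * s + s ≤ c * s := by
    have h1 := Nat.mul_le_mul_right s (Nat.succ_le_of_lt hi)
    rwa [Nat.succ_mul] at h1
  have hax : (c - 1 - j) * s + x < c * s := by omega
  have hget : p[(c - 1 - j) * s + x]? = some (p.getD ((c - 1 - j) * s + x) []) := by
    rw [List.getD_eq_getElem?_getD, List.getElem?_eq_getElem (by omega)]
    rfl
  have hprow : c * s ≤ (p.getD ((c - 1 - j) * s + x) []).length := by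
    apply hrows
    rw [List.mem_iff_getElem?]
    exact ⟨(c - 1 - j) * s + x, by rw [List.getElem?_take, if_pos hax]; exact hget⟩
  constructor
  · rw [List.getD_eq_getElem?_getD, List.getElem?_map, List.getElem?_take, if_pos hx,
      List.getElem?_drop, hget]
    rfl
  · rw [List.length_take, List.length_drop]
    omega

lemma pvRow_len (p : List (List Int)) (s c i x : Nat) (hs : 0 < s)
    (hc : c * s ≤ p.length)
    (hrows : ∀ row ∈ p.take (c * s), c * s ≤ row.length)
    (hi : i < c) (hx : x < s) :
    (pvRow p s c i x).length = p.length := by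
  unfold pvRow
  rw [List.length_append, List.length_replicate,
    flat_len c s _ (fun j hj => by rw [(seg_fact p s c i j x hs hc hrows hi hj hx).1]
                                   exact (seg_fact p s c i j x hs hc hrows hi hj hx).2)]
  omega

lemma pvRow_E (p : List (List Int)) (s c i x v : Nat) (hs : 0 < s)
    (hc : c * s ≤ p.length)
    (hrows : ∀ row ∈ p.take (c * s), c * s ≤ row.length)
    (hi : i < c) (hx : x < s) :
    (pvRow p s c i x).getD v 0
      = if v < c * s then pvVal p s c (i * s + x) v else 0 := by
  have hlen : ∀ j, j < c →
      (((((p.drop ((c - 1 - j) * s)).take s).map (fun row => (row.drop (i * s)).take s)).getD x [])).length = s := by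
    intro j hj
    rw [(seg_fact p s c i j x hs hc hrows hi hj hx).1]
    exact (seg_fact p s c i j x hs hc hrows hi hj hx).2
  unfold pvRow
  rw [List.getD_eq_getElem?_getD, List.getElem?_append, flat_len c s _ hlen]
  by_cases hv : v < c * s
  · rw [if_pos hv, if_pos hv, flat_get c s _ hlen v hv]
    have hjc : v / s < c := (Nat.div_lt_iff_lt_mul hs).mpr hv
    have hys : v % s < s := Nat.mod_lt _ hs
    rw [(seg_fact p s c i (v / s) x hs hc hrows hi hjc hx).1]
    rw [List.getElem?_take, if_pos hys, List.getElem?_drop]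
    unfold pvVal
    obtain ⟨hd, hm⟩ : (i * s + x) / s = i ∧ (i * s + x) % s = x := by
      constructor
      · rw [Nat.add_comm, Nat.mul_comm, Nat.add_mul_div_left _ _ hs, Nat.div_eq_of_lt hx]
        omega
      · rw [Nat.add_comm, Nat.mul_comm, Nat.add_mul_mod_self_left, Nat.mod_eq_of_lt hx]
    rw [hd, hm, List.getD_eq_getElem?_getD, List.getD_eq_getElem?_getD]
  · rw [if_neg hv, if_neg hv, List.getElem?_replicate]
    split_ifs <;> rfl

lemma r7_alt_char (p : List (List Int)) (l : Int)
    (hrows : ∀ row ∈ p.take (p.length / (1 <<< l.toNat) * (1 <<< l.toNat)),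
      p.length / (1 <<< l.toNat) * (1 <<< l.toNat) ≤ row.length) :
    pvShape (r7_alt p l) p.length ∧
    ∀ u v, pvE (r7_alt p l) u v
      = if u < p.length / (1 <<< l.toNat) * (1 <<< l.toNat) ∧
           v < p.length / (1 <<< l.toNat) * (1 <<< l.toNat)
        then pvVal p (1 <<< l.toNat) (p.length / (1 <<< l.toNat)) u v else 0 := by
  have hs : 0 < 1 <<< l.toNat := by rw [Nat.one_shiftLeft]; exact Nat.two_pow_pos l.toNat
  have hmn : p.length / (1 <<< l.toNat) * (1 <<< l.toNat) ≤ p.length :=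
    Nat.div_mul_le_self p.length (1 <<< l.toNat)
  have hFlen : ∀ i, i < p.length / (1 <<< l.toNat) →
      ((List.range (1 <<< l.toNat)).map (fun x =>
        pvRow p (1 <<< l.toNat) (p.length / (1 <<< l.toNat)) i x)).length = 1 <<< l.toNat := by
    intro i hi; rw [List.length_map, List.length_range]
  have htoplen : ((List.range (p.length / (1 <<< l.toNat))).flatMap (fun i =>
      (List.range (1 <<< l.toNat)).map (fun x =>
        pvRow p (1 <<< l.toNat) (p.length / (1 <<< l.toNat)) i x))).length
      = p.length / (1 <<< l.toNat) * (1 <<< l.toNat) :=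
    flat_len _ _ _ hFlen
  rw [r7_alt_eq]
  constructor
  · constructor
    · rw [List.length_append, htoplen, List.length_replicate]; omega
    · intro row hrow
      rcases List.mem_append.mp hrow with h | h
      · obtain ⟨i, hi, hrow2⟩ := List.mem_flatMap.mp h
        obtain ⟨x, hx, hrow3⟩ := List.mem_map.mp hrow2
        rw [← hrow3]
        exact pvRow_len p _ _ i x hs hmn hrows (List.mem_range.mp hi) (List.mem_range.mp hx)
      · rw [List.eq_of_mem_replicate h, List.length_replicate]
  · intro u v
    unfold pvE
    rw [List.getD_eq_getElem?_getD, List.getD_eq_getElem?_getD, List.getElem?_append, htoplen]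
    by_cases hu : u < p.length / (1 <<< l.toNat) * (1 <<< l.toNat)
    · rw [if_pos hu, flat_get _ _ _ hFlen u hu]
      have hic : u / (1 <<< l.toNat) < p.length / (1 <<< l.toNat) :=
        (Nat.div_lt_iff_lt_mul hs).mpr hu
      have hxs : u % (1 <<< l.toNat) < 1 <<< l.toNat := Nat.mod_lt _ hs
      rw [List.getElem?_map, List.getElem?_range hxs]
      simp only [Option.map_some, Option.getD_some]
      rw [← List.getD_eq_getElem?_getD, pvRow_E p _ _ _ _ v hs hmn hrows hic hxs]
      have hdm : u / (1 <<< l.toNat) * (1 <<< l.toNat) + u % (1 <<< l.toNat) = u := by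
        rw [Nat.mul_comm]; exact Nat.div_add_mod u (1 <<< l.toNat)
      rw [hdm]
      by_cases hv : v < p.length / (1 <<< l.toNat) * (1 <<< l.toNat)
      · rw [if_pos hv, if_pos ⟨hu, hv⟩]
      · rw [if_neg hv, if_neg (by omega)]
    · rw [if_neg hu, if_neg (by omega), List.getElem?_replicate]
      split_ifs <;> simp [List.getElem?_replicate]
      split_ifs <;> rfl

lemma mat_ext (A B : List (List Int)) (n : Nat)
    (hA : pvShape A n) (hB : pvShape B n)
    (h : ∀ u v, pvE A u v = pvE B u v) : A = B := by
  apply List.ext_getElem (hA.1.trans hB.1.symm)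
  intro u h1 h2
  apply List.ext_getElem
  · rw [hA.2 _ (List.getElem_mem h1), hB.2 _ (List.getElem_mem h2)]
  · intro v hv1 hv2
    have e := h u v
    simp only [pvE, List.getD_eq_getElem?_getD] at e
    rw [List.getElem?_eq_getElem h1, List.getElem?_eq_getElem h2] at e
    simp only [Option.getD_some] at e
    rw [List.getElem?_eq_getElem hv1, List.getElem?_eq_getElem hv2] at e
    simpa using e

lemma r7_char (p : List (List Int)) (l : Int) :
    pvShape (r7 p l) p.length ∧
    ∀ u v, pvE (r7 p l) u v
      = if u < p.length / (1 <<< l.toNat) * (1 <<< l.toNat) ∧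
           v < p.length / (1 <<< l.toNat) * (1 <<< l.toNat)
        then pvVal p (1 <<< l.toNat) (p.length / (1 <<< l.toNat)) u v else 0 := by
  rw [r7_eq_fold]
  have hshape : pvShape (List.replicate p.length (List.replicate p.length (0 : Int))) p.length :=
    ⟨List.length_replicate, fun row h => by
      rw [List.eq_of_mem_replicate h]; exact List.length_replicate⟩
  have hmn := Nat.div_mul_le_self p.length (1 <<< l.toNat)
  obtain ⟨hS, hE⟩ := ifold_E p (1 <<< l.toNat) (p.length / (1 <<< l.toNat)) p.length _
    hshape hmn _ (le_refl _)
  exact ⟨hS, fun u v => by rw [hE u v, zero_E]⟩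

-- ===== VERDICT (by name: the statement is the Claim_ definition above) =====
theorem r7_spec : Claim_equal_r7 := by
  intro p l _ hpre
  unfold Spec_r7
  obtain ⟨hA, hEA⟩ := r7_char p l
  obtain ⟨hB, hEB⟩ := r7_alt_char p l hpre.2
  exact mat_ext _ _ p.length hA hB (fun u v => by rw [hEA, hEB])
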